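-- pv_equiv track=rewrite | github.com/sg-stack/New_Stripe_Questions | Min_penalty_3.py | get_closetime
-- ===== SOURCE A (Python) =====
-- def get_closetime(l):
--     closepenalty=0
--     ind=-1
--     currentpenalty=0
--     for i in range(len(l)):
--             if l[i]=="Y":
--                 currentpenalty-=1
--             else:
--                 currentpenalty+=1
--             if currentpenalty<closepenalty:
--                 closepenalty=currentpenalty
--                 ind=i
--     return ind+1
-- ===== SOURCE B (Python) =====
-- def get_closetime(l):
--     # staged passes: build the prefix-penalty table, take its global min,
--     # then look up the first index attaining it
--     prefix = []
--     s = 0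
--     for x in l:
--         s += -1 if x == "Y" else 1
--         prefix.append(s)
--     if not prefix:
--         return 0
--     m = min(prefix)
--     return prefix.index(m) + 1 if m < 0 else 0
-- ===== Notes on version B (the rewrite author's own statement) =====
-- stated objective: alternative
-- what changed: Replaced the fused running-min scan carrying (closepenalty, ind, currentpenalty) by three staged passes: build the prefix-sum penalty table, take its global minimum with min(), and return the first index of that minimum via list.index (or 0 if the minimum is nonnegative or the list is empty).
import Mathlib
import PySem

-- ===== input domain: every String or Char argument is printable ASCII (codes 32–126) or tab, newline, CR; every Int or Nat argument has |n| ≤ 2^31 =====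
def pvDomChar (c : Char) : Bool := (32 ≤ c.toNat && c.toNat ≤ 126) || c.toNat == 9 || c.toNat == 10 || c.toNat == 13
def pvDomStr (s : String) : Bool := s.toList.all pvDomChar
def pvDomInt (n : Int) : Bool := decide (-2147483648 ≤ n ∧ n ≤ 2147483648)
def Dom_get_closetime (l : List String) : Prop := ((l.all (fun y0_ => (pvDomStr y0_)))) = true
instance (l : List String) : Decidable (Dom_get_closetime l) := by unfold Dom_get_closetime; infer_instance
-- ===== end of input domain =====

-- B replaces A's fused running-min scan by staged passes (prefix-sum table, global min, first-index lookup); same value, same cost.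

-- ===== PORT A =====
-- A's loop over range(len(l)) with state (closepenalty, ind, currentpenalty), as structural recursion with explicit index i
def get_closetime_loop : List String → Nat → Int → Int → Int → Int × Int × Int
  | [], _, cp, ind, cur => (cp, ind, cur)
  | x :: xs, i, cp, ind, cur =>
    let cur' := if x == "Y" then cur - 1 else cur + 1
    if cur' < cp then get_closetime_loop xs (i + 1) cur' (i : Int) cur'
    else get_closetime_loop xs (i + 1) cp ind cur'

def get_closetime (l : List String) : Int :=
  (get_closetime_loop l 0 0 (-1) 0).2.1 + 1

-- ===== PORT B =====
def pvDeltas (l : List String) : List Int := l.map (fun x => if x == "Y" then -1 else 1)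

-- the prefix-sum table built by B's first loop
def pvPrefix : Int → List Int → List Int
  | _, [] => []
  | s, d :: ds => (s + d) :: pvPrefix (s + d) ds

def get_closetime_alt (l : List String) : Int :=
  match PySem.List.min? (pvPrefix 0 (pvDeltas l)) (fun y => y) with
  | none => 0              -- empty list: 'if not prefix: return 0'
  | Option.some m =>
    if m < 0 then
      match PySem.List.index? (pvPrefix 0 (pvDeltas l)) m with
      | Option.some j => (j : Int) + 1
      | none => 0          -- unreachable: the minimum is a member
    else 0

-- ===== PRECONDITION & SPEC =====
def Spec_get_closetime (l : List String) (out : Int) : Prop := out = get_closetime_alt l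
instance (l : List String) (out : Int) : Decidable (Spec_get_closetime l out) := by unfold Spec_get_closetime; infer_instance

-- ===== CLAIM (what is proved, stated in full; the proofs are below) =====
def Claim_equal_get_closetime : Prop := ∀ (l : List String), Dom_get_closetime l → Spec_get_closetime l (get_closetime l)

-- ===== LEMMAS AND PROOFS =====

-- (minimum value, index of its first occurrence) of a list, recursively
def pvMfi : List Int → Option (Int × Nat)
  | [] => none
  | a :: t =>
    match pvMfi t with
    | none => some (a, 0)
    | Option.some (m, j) => if m < a then some (m, j + 1) else some (a, 0)

theorem pvMfi_none_iff (P : List Int) : pvMfi P = none ↔ P = [] := by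
  cases P with
  | nil => simp [pvMfi]
  | cons a t =>
    simp only [pvMfi]
    cases h : pvMfi t with
    | none => simp
    | some p => obtain ⟨m, j⟩ := p; by_cases hm : m < a <;> simp [hm]

theorem pvMfi_foldl_min (P : List Int) : ∀ x : Int,
    (match pvMfi P with | none => x | Option.some (m, _) => min x m) = P.foldl min x := by
  induction P with
  | nil => intro x; simp [pvMfi]
  | cons a t ih =>
    intro x
    simp only [pvMfi, List.foldl_cons]
    rw [← ih (min x a)]
    cases h : pvMfi t with
    | none => simp
    | some p =>
      obtain ⟨m, j⟩ := p
      by_cases hm : m < a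
      · simp only [hm, if_true]
        rw [min_assoc, min_eq_right hm.le]
      · simp only [hm, if_false]
        rw [min_assoc, min_eq_left (not_lt.mp hm)]

theorem pvMfi_min? (P : List Int) (m : Int) (j : Nat) (h : pvMfi P = some (m, j)) :
    PySem.List.min? P (fun y => y) = some m := by
  cases P with
  | nil => simp [pvMfi] at h
  | cons a t =>
    rw [PySem.List.min?_id_cons]
    have hf := pvMfi_foldl_min t a
    simp only [pvMfi] at h
    cases ht : pvMfi t with
    | none =>
      rw [ht] at h hf
      dsimp only at h hf
      simp only [Option.some.injEq, Prod.mk.injEq] at h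
      rw [← hf, h.1]
    | some p =>
      obtain ⟨m', j'⟩ := p
      rw [ht] at h hf
      dsimp only at h hf
      by_cases hm : m' < a
      · simp only [hm, if_true, Option.some.injEq, Prod.mk.injEq] at h
        rw [← hf, min_eq_right hm.le, h.1]
      · simp only [hm, if_false, Option.some.injEq, Prod.mk.injEq] at h
        rw [← hf, min_eq_left (not_lt.mp hm), h.1]

theorem pvMfi_index? (P : List Int) (m : Int) (j : Nat) (h : pvMfi P = some (m, j)) :
    PySem.List.index? P m = some j := by
  induction P generalizing m j with
  | nil => simp [pvMfi] at h
  | cons a t ih =>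
    simp only [pvMfi] at h
    cases ht : pvMfi t with
    | none =>
      rw [ht] at h; simp only [Option.some.injEq, Prod.mk.injEq] at h
      rw [← h.1, ← h.2]
      exact PySem.List.index?_cons_self a t
    | some p =>
      obtain ⟨m', j'⟩ := p
      rw [ht] at h
      by_cases hm : m' < a
      · simp only [hm, if_true, Option.some.injEq, Prod.mk.injEq] at h
        obtain ⟨h1, h2⟩ := h
        subst h1; subst h2
        rw [PySem.List.index?_cons_of_ne t (by omega : a ≠ m'), ih m' j' ht]
        rfl
      · simp only [hm, if_false, Option.some.injEq, Prod.mk.injEq] at h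
        rw [← h.1, ← h.2]
        exact PySem.List.index?_cons_self a t

-- the loop of A computed from the prefix-sum table of B
theorem get_closetime_loop_char (l : List String) : ∀ (i : Nat) (cp ind cur : Int),
    get_closetime_loop l i cp ind cur =
      match pvMfi (pvPrefix cur (pvDeltas l)) with
      | none => (cp, ind, cur)
      | Option.some (m, j) =>
        if m < cp then (m, ((i + j : Nat) : Int), cur + (pvDeltas l).sum)
        else (cp, ind, cur + (pvDeltas l).sum) := by
  induction l with
  | nil => intro i cp ind cur; simp [get_closetime_loop, pvDeltas, pvPrefix, pvMfi]
  | cons x xs ih =>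
    intro i cp ind cur
    have hd : pvDeltas (x :: xs) = (if x == "Y" then (-1 : Int) else 1) :: pvDeltas xs := rfl
    set d : Int := if x == "Y" then (-1 : Int) else 1 with hdd
    have hcur' : (if x == "Y" then cur - 1 else cur + 1) = cur + d := by
      by_cases hx : x == "Y" <;> simp [hdd, hx] <;> ring_nf
    simp only [get_closetime_loop, hcur', hd, pvPrefix, List.sum_cons, pvMfi]
    by_cases hlt : cur + d < cp
    · simp only [if_pos hlt]
      rw [ih (i + 1) (cur + d) (i : Int) (cur + d)]
      cases ht : pvMfi (pvPrefix (cur + d) (pvDeltas xs)) with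
      | none =>
        have hnil : pvPrefix (cur + d) (pvDeltas xs) = [] := (pvMfi_none_iff _).mp ht
        have hxs : (pvDeltas xs).sum = 0 := by
          cases hc : pvDeltas xs with
          | nil => simp
          | cons a b => rw [hc] at hnil; simp [pvPrefix] at hnil
        simp only [hxs, if_pos hlt, Prod.mk.injEq]
        exact ⟨trivial, by push_cast; ring, by ring⟩
      | some p =>
        obtain ⟨m', j'⟩ := p
        by_cases hm : m' < cur + d
        · have h1 : m' < cp := by omega
          simp only [hm, if_true, if_pos h1, Prod.mk.injEq]
          exact ⟨trivial, by push_cast; ring, by ring⟩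
        · simp only [hm, if_false, if_pos hlt, Prod.mk.injEq]
          exact ⟨trivial, by push_cast; ring, by ring⟩
    · simp only [if_neg hlt]
      rw [ih (i + 1) cp ind (cur + d)]
      cases ht : pvMfi (pvPrefix (cur + d) (pvDeltas xs)) with
      | none =>
        have hnil : pvPrefix (cur + d) (pvDeltas xs) = [] := (pvMfi_none_iff _).mp ht
        have hxs : (pvDeltas xs).sum = 0 := by
          cases hc : pvDeltas xs with
          | nil => simp
          | cons a b => rw [hc] at hnil; simp [pvPrefix] at hnil
        simp only [hxs, if_neg hlt, Prod.mk.injEq]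
        exact ⟨trivial, trivial, by ring⟩
      | some p =>
        obtain ⟨m', j'⟩ := p
        by_cases hm : m' < cur + d
        · simp only [hm, if_true]
          by_cases h1 : m' < cp
          · simp only [if_pos h1, Prod.mk.injEq]
            exact ⟨trivial, by push_cast; ring, by ring⟩
          · simp only [if_neg h1, Prod.mk.injEq]
            exact ⟨trivial, trivial, by ring⟩
        · have h1 : ¬ m' < cp := by omega
          simp only [hm, if_false, if_neg hlt, if_neg h1, Prod.mk.injEq]
          exact ⟨trivial, trivial, by ring⟩

-- ===== VERDICT (by name: the statement is the Claim_ definition above) =====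
theorem get_closetime_spec : Claim_equal_get_closetime := by
  intro l _
  unfold Spec_get_closetime get_closetime get_closetime_alt
  rw [get_closetime_loop_char l 0 0 (-1) 0]
  cases ht : pvMfi (pvPrefix 0 (pvDeltas l)) with
  | none =>
    have hnil : pvPrefix 0 (pvDeltas l) = [] := (pvMfi_none_iff _).mp ht
    rw [hnil]
    simp only []
    split <;> simp
  | some p =>
    obtain ⟨m, j⟩ := p
    rw [pvMfi_min? _ _ _ ht]
    dsimp only
    rw [pvMfi_index? _ _ _ ht]
    by_cases hm : m < 0 <;> simp [hm]
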